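-- pv_equiv track=rewrite | github.com/tictactoeid/Algorithm-Problems | Programmers/코딩테스트 고득점 kit/240904 - 43162.py | bfs
-- ===== SOURCE A (Python) =====
-- from collections import deque
--
-- def bfs(i, network_number, computers, network_info):
--     q = deque()
--     q.append(i)
--
--     while q:
--         node = q.popleft()
--         network_info[node] = network_number
--         for next in range(len(computers)):
--             if not network_info[next] and computers[node][next]:
--                 q.append(next)
--                 network_info[node] = network_number
--     return network_info
-- ===== SOURCE B (Python) =====
-- def bfs(i, network_number, computers, network_info):
--     def dfs(node):
--         network_info[node] = network_number
--         for next in range(len(computers)):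
--             if not network_info[next] and computers[node][next]:
--                 dfs(next)
--     dfs(i)
--     return network_info
-- ===== Notes on version B (the rewrite author's own statement) =====
-- stated objective: idiomatic
-- what changed: A's explicit BFS worklist (a deque that can re-enqueue the same still-unlabeled node many times and marks on pop) is replaced by a recursive DFS helper that labels a node on visit and recurses into each still-unlabeled neighbour, visiting every node at most once.
-- outside the precondition, e.g. on bfs(-1, 5, [[0, 1], [1, 0]], [0, 0]): A returns [5, 5], B returns [5, 5]; on bfs(1, 5, [[1, 1], [1]], [0, 0]): A returns [5, 5], B returns [5, 5]; on bfs(0, 0, [[0, 1], [0, 0]], [0, 0]): A returns [0, 0], B returns [0, 0]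
import Mathlib
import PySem

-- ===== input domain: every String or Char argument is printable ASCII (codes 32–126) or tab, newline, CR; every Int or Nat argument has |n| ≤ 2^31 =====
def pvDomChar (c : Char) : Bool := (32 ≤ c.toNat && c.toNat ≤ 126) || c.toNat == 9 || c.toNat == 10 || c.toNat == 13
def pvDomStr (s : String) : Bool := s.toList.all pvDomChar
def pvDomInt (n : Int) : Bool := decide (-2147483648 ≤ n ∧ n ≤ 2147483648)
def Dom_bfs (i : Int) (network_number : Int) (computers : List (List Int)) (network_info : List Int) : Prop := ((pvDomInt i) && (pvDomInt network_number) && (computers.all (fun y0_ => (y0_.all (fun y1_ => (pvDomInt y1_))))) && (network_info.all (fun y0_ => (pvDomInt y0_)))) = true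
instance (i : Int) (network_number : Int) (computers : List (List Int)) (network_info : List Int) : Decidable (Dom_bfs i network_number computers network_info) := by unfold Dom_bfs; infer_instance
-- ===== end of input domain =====

-- B replaces A's BFS deque (which marks on pop and may re-enqueue a node many times) by a
-- recursive DFS that labels each node on visit; both mutate/return the same labeling, and the
-- equivalence proved here is about the RETURN value (both Pythons mutate network_info alike).


-- ===== PORT A =====
-- Inner 'for next in range(len(computers))' of A: threads (network_info, appended queue items).
-- pyGetD/pySetD defaults are only reached where the Python raises IndexError (excluded by Pre_).
def bfsScan (network_number node : Int) (computers : List (List Int))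
    (st : List Int × List Int) : List Int × List Int :=
  (PySem.List.pyRange 0 (computers.length : Int) 1).foldl
    (fun st next =>
      if PySem.List.pyGetD st.1 next 1 == 0 &&
         !(PySem.List.pyGetD (PySem.List.pyGetD computers node []) next 0 == 0)
      then (PySem.List.pySetD st.1 node network_number, st.2 ++ [next])
      else st) st

-- A's 'while q' loop.  z/pos are pure termination fuel (Python has none): z falls when the popped
-- node was unlabeled, pos when it was already labeled; the computation in both branches is
-- identical, and the fuel-exhaustion returns are unreachable under Pre_ (proved below).
def bfsLoop (network_number : Int) (computers : List (List Int)) :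
    Nat → Nat → List Int → List Int → List Int
  | _, _, [], info => info
  | z, pos, node :: rest, info =>
    let wasZero := PySem.List.pyGetD info node 1 == 0
    let st := bfsScan network_number node computers
        (PySem.List.pySetD info node network_number, [])
    let q' := rest ++ st.2
    if wasZero then
      match z with
      | 0 => st.1
      | z' + 1 => bfsLoop network_number computers z' q'.length q' st.1
    else
      match pos with
      | 0 => st.1
      | pos' + 1 => bfsLoop network_number computers z pos' q' st.1
  termination_by z pos q _ => (z, pos)

def bfs (i : Int) (network_number : Int) (computers : List (List Int)) (network_info : List Int) : List Int :=
  bfsLoop network_number computers (network_info.length + 1) 1 [i] network_info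

-- ===== PORT B =====
-- B's recursive dfs(node); the Nat argument is termination fuel only (unreachable under Pre_).
mutual
def dfsVisit (network_number : Int) (computers : List (List Int)) :
    Nat → Int → List Int → List Int
  | 0, _, info => info
  | z + 1, node, info =>
    dfsFold network_number computers z node
      (PySem.List.pyRange 0 (computers.length : Int) 1)
      (PySem.List.pySetD info node network_number)
  termination_by z _ _ => (z, 0, 0)

def dfsFold (network_number : Int) (computers : List (List Int)) :
    Nat → Int → List Int → List Int → List Int
  | _, _, [], cur => cur
  | z, node, next :: l, cur =>
    if PySem.List.pyGetD cur next 1 == 0 &&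
       !(PySem.List.pyGetD (PySem.List.pyGetD computers node []) next 0 == 0)
    then dfsFold network_number computers z node l (dfsVisit network_number computers z next cur)
    else dfsFold network_number computers z node l cur
  termination_by z _ l _ => (z, 1, l.length)
end

def bfs_alt (i : Int) (network_number : Int) (computers : List (List Int)) (network_info : List Int) : List Int :=
  dfsVisit network_number computers (network_info.length + 1) i network_info

-- ===== PRECONDITION & SPEC =====
-- Pre_ admits (a) well-formed runs — square matrix, 0 <= i < n, nonzero label, network_info at
-- least as long as computers — and (b) single-visit runs, where the start node (any index
-- network_info accepts) has no still-zero neighbour its row reaches, so both programs just label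
-- it and stop.  It excludes inputs on which A raises IndexError (ragged rows reached mid-walk,
-- short network_info), can loop forever (network_number = 0 beside a reachable zero entry), and
-- multi-node walks that only return through negative-index wraparound or lucky raggedness — a
-- corner artefact of A's indexing; B's Python agrees wherever A returns there.
def Pre_bfs (i : Int) (network_number : Int) (computers : List (List Int)) (network_info : List Int) : Prop :=
  (computers.length ≤ network_info.length ∧ PySem.Raise.InRange network_info.length i ∧
    ∀ t, t < computers.length →
      (PySem.List.pySetD network_info i network_number).getD t 0 = 0 →
      PySem.List.pyGet? computers i ≠ none ∧
      PySem.List.pyGet? (PySem.List.pyGetD computers i []) (t : Int) = some 0) ∨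
  (0 ≤ i ∧ i < (computers.length : Int) ∧ computers.length ≤ network_info.length ∧
    (∀ row ∈ computers, row.length = computers.length) ∧ network_number ≠ 0)
instance (i : Int) (network_number : Int) (computers : List (List Int)) (network_info : List Int) : Decidable (Pre_bfs i network_number computers network_info) := by unfold Pre_bfs; infer_instance

def pvWitness_bfs : Int × Int × List (List Int) × List Int := (0, 1, [[0, 1], [1, 0]], [0, 0])

def Spec_bfs (i : Int) (network_number : Int) (computers : List (List Int)) (network_info : List Int) (out : List Int) : Prop := out = bfs_alt i network_number computers network_info
instance (i : Int) (network_number : Int) (computers : List (List Int)) (network_info : List Int) (out : List Int) : Decidable (Spec_bfs i network_number computers network_info out) := by unfold Spec_bfs; infer_instance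

-- ===== CLAIM (what is proved, stated in full; the proofs are below) =====
def Claim_equal_bfs : Prop := ∀ (i : Int) (network_number : Int) (computers : List (List Int)) (network_info : List Int), Dom_bfs i network_number computers network_info → Pre_bfs i network_number computers network_info → Spec_bfs i network_number computers network_info (bfs i network_number computers network_info)

-- ===== LEMMAS AND PROOFS =====

-- info0 overwritten with nn on the index set M.
def ovr (nn : Int) (info0 : List Int) (M : Finset Nat) : List Int :=
  info0.mapIdx (fun j x => if j ∈ M then nn else x)

-- number of still-zero, not-yet-labeled entries (drives the fuel bookkeeping).
def zer (info0 : List Int) (M : Finset Nat) : Nat :=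
  ((Finset.range info0.length).filter (fun j => j ∉ M ∧ info0.getD j 0 = 0)).card

-- nodes reachable from s stepping only into in-range, initially-zero nodes outside M.
inductive RF (cs : List (List Int)) (info0 : List Int) (M : Finset Nat) (s : Nat) : Nat → Prop
  | base : RF cs info0 M s s
  | step {w v : Nat} : RF cs info0 M s w → v < cs.length → info0.getD v 0 = 0 → v ∉ M →
      (cs.getD w []).getD v 0 ≠ 0 → RF cs info0 M s v

theorem RF_mono_trans (cs : List (List Int)) (info0 : List Int) (M M2 : Finset Nat)
    (s u x : Nat) (hsub : M ⊆ M2) (hsu : RF cs info0 M s u) (h : RF cs info0 M2 u x) :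
    RF cs info0 M s x := by
  induction h with
  | base => exact hsu
  | step _ hv hz hnm he ih => exact RF.step ih hv hz (fun hx => hnm (hsub hx)) he

theorem RF_mem_of_closed (cs : List (List Int)) (info0 : List Int) (s : Nat) (C : Finset Nat)
    (hs : s ∈ C)
    (hcl : ∀ w ∈ C, ∀ v, v < cs.length → info0.getD v 0 = 0 →
      (cs.getD w []).getD v 0 ≠ 0 → v ∈ C) :
    ∀ x, RF cs info0 ∅ s x → x ∈ C := by
  intro x h
  induction h with
  | base => exact hs
  | step _ hv hz _ he ih => exact hcl _ ih _ hv hz he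

theorem zer_le (info0 : List Int) (M : Finset Nat) : zer info0 M ≤ info0.length := by
  classical
  calc zer info0 M ≤ (Finset.range info0.length).card := Finset.card_filter_le _ _
  _ = info0.length := Finset.card_range _

theorem zer_anti (info0 : List Int) (M M' : Finset Nat) (h : M ⊆ M') :
    zer info0 M' ≤ zer info0 M := by
  apply Finset.card_le_card
  intro j hj
  simp only [Finset.mem_filter] at *
  exact ⟨hj.1, fun hm => hj.2.1 (h hm), hj.2.2⟩

theorem zer_insert_of_unm (info0 : List Int) (M : Finset Nat) (u : Nat)
    (hu : u < info0.length) (hnm : u ∉ M) (hz : info0.getD u 0 = 0) :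
    zer info0 (M ∪ {u}) = zer info0 M - 1 ∧ 1 ≤ zer info0 M := by
  classical
  have hu' : u ∈ (Finset.range info0.length).filter (fun j => j ∉ M ∧ info0.getD j 0 = 0) := by
    have hz' : info0[u] = 0 := by
      simpa [List.getD_eq_getElem?_getD, List.getElem?_eq_getElem hu] using hz
    simp [Finset.mem_filter, Finset.mem_range, hu, hnm, hz']
  have hset : (Finset.range info0.length).filter (fun j => j ∉ M ∪ {u} ∧ info0.getD j 0 = 0) =
      ((Finset.range info0.length).filter (fun j => j ∉ M ∧ info0.getD j 0 = 0)).erase u := by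
    ext j
    simp only [Finset.mem_filter, Finset.mem_erase, Finset.mem_union, Finset.mem_singleton,
      Finset.mem_range, not_or]
    tauto
  constructor
  · simp only [zer, hset]
    exact Finset.card_erase_of_mem hu'
  · exact Finset.card_pos.mpr ⟨u, hu'⟩

theorem zer_insert_of_marked (info0 : List Int) (M : Finset Nat) (u : Nat)
    (h : u ∈ M ∨ info0.getD u 0 ≠ 0) :
    zer info0 (M ∪ {u}) = zer info0 M := by
  classical
  have hset : (Finset.range info0.length).filter (fun j => j ∉ M ∪ {u} ∧ info0.getD j 0 = 0) =
      (Finset.range info0.length).filter (fun j => j ∉ M ∧ info0.getD j 0 = 0) := by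
    ext j
    simp only [Finset.mem_filter, Finset.mem_union, Finset.mem_singleton, not_or]
    constructor
    · rintro ⟨hr, ⟨h1, _⟩, h3⟩; exact ⟨hr, h1, h3⟩
    · rintro ⟨hr, h1, h3⟩
      refine ⟨hr, ⟨h1, ?_⟩, h3⟩
      rintro rfl
      rcases h with h | h
      · exact h1 h
      · exact h h3
  simp only [zer, hset]

theorem ovr_empty (nn : Int) (info0 : List Int) : ovr nn info0 ∅ = info0 := by
  apply List.ext_getElem
  · simp [ovr]
  · intro j h1 h2
    simp [ovr, List.getElem_mapIdx]

theorem ovr_get (nn : Int) (info0 : List Int) (M : Finset Nat) (m : Nat)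
    (hm : m < info0.length) :
    PySem.List.pyGetD (ovr nn info0 M) (m : Int) 1 = if m ∈ M then nn else info0.getD m 0 := by
  rw [PySem.List.pyGetD_natCast]
  simp [ovr, List.getD_eq_getElem?_getD, List.getElem?_mapIdx, List.getElem?_eq_getElem hm]

theorem ovr_set (nn : Int) (info0 : List Int) (M : Finset Nat) (m : Nat)
    (hm : m < info0.length) :
    PySem.List.pySetD (ovr nn info0 M) (m : Int) nn = ovr nn info0 (M ∪ {m}) := by
  rw [PySem.List.pySetD_natCast]
  apply List.ext_getElem
  · simp [ovr]
  · intro j h1 h2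
    have hj : j < info0.length := by simpa [ovr] using h2
    by_cases hjm : j = m
    · subst hjm
      simp [ovr, List.getElem_mapIdx]
    · simp only [ovr, List.getElem_set, List.getElem_mapIdx, Finset.mem_union,
        Finset.mem_singleton, hjm, or_false]
      rw [if_neg (fun h => hjm h.symm)]

theorem ovr_congr (nn : Int) (info0 : List Int) (M M' : Finset Nat)
    (h : ∀ x, x ∈ M ↔ x ∈ M') : ovr nn info0 M = ovr nn info0 M' := by
  have : M = M' := Finset.ext h
  rw [this]

-- the Bool guard shared by both ports, over an overlay state
theorem guard_eq (nn : Int) (hnn : nn ≠ 0) (cs : List (List Int)) (info0 : List Int)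
    (M : Finset Nat) (u m : Nat) (hm : m < info0.length) :
    ((PySem.List.pyGetD (ovr nn info0 M) (m : Int) 1 == 0) &&
      !(PySem.List.pyGetD (PySem.List.pyGetD cs (u : Int) []) (m : Int) 0 == 0)) =
    decide ((m ∉ M ∧ info0.getD m 0 = 0) ∧ (cs.getD u []).getD m 0 ≠ 0) := by
  rw [ovr_get nn info0 M m hm, PySem.List.pyGetD_natCast, PySem.List.pyGetD_natCast]
  by_cases h1 : m ∈ M
  · simp [h1, hnn, Bool.beq_eq_decide_eq]
  · by_cases h2 : info0.getD m 0 = 0 <;> by_cases h3 : (cs.getD u []).getD m 0 = 0 <;>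
      simp [h1, Bool.beq_eq_decide_eq]

-- A's inner scan: the info component is already fixed at ovr (M ∪ {u}); the queue component
-- collects exactly the eligible indices.
theorem bfsScan_spec (nn : Int) (hnn : nn ≠ 0) (cs : List (List Int)) (info0 : List Int)
    (M : Finset Nat) (u : Nat) (hu : u < info0.length) (acc : List Int) :
    bfsScan nn (u : Int) cs (ovr nn info0 (M ∪ {u}), acc) =
      (ovr nn info0 (M ∪ {u}),
        acc ++ (PySem.List.pyRange 0 (cs.length : Int) 1).filter (fun next =>
          (PySem.List.pyGetD (ovr nn info0 (M ∪ {u})) next 1 == 0) &&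
          !(PySem.List.pyGetD (PySem.List.pyGetD cs (u : Int) []) next 0 == 0))) := by
  have hfix : PySem.List.pySetD (ovr nn info0 (M ∪ {u})) (u : Int) nn =
      ovr nn info0 (M ∪ {u}) := by
    rw [ovr_set nn info0 (M ∪ {u}) u hu]
    apply ovr_congr
    intro x
    simp [Finset.mem_union, or_assoc]
  unfold bfsScan
  generalize (PySem.List.pyRange 0 (cs.length : Int) 1) = l
  induction l generalizing acc with
  | nil => simp
  | cons a l ih =>
    simp only [List.foldl_cons, List.filter_cons]
    by_cases hg : ((PySem.List.pyGetD (ovr nn info0 (M ∪ {u})) a 1 == 0) &&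
        !(PySem.List.pyGetD (PySem.List.pyGetD cs (u : Int) []) a 0 == 0)) = true
    · simp only [hg, if_true, hfix]
      rw [ih (acc ++ [a])]
      simp
    · simp only [Bool.not_eq_true] at hg
      simp only [hg, if_false, Bool.false_eq_true]
      rw [ih acc]

-- ===== the two main correctness lemmas =====

theorem bfsLoop_spec (nn : Int) (cs : List (List Int)) (info0 : List Int)
    (hnn : nn ≠ 0) (hlen : cs.length ≤ info0.length) (s : Nat) :
    ∀ z pos (q : List Int) (M : Finset Nat),
      (∀ x ∈ q, ∃ m : Nat, x = (m : Int) ∧ m < cs.length ∧ RF cs info0 ∅ s m) →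
      (s ∈ M ∨ (s : Int) ∈ q) →
      (∀ m ∈ M, m < cs.length) →
      (∀ u ∈ M, ∀ v, v < cs.length → info0.getD v 0 = 0 →
        (cs.getD u []).getD v 0 ≠ 0 → v ∈ M ∨ (v : Int) ∈ q) →
      zer info0 M + 1 ≤ z →
      (∀ j, j < q.length → (∀ x ∈ q.take (j + 1),
        ¬ (x.toNat ∉ M ∧ info0.getD x.toNat 0 = 0)) → j < pos) →
      (∀ x ∈ M, RF cs info0 ∅ s x) →
      ∃ C : Finset Nat, bfsLoop nn cs z pos q (ovr nn info0 M) = ovr nn info0 C ∧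
        (∀ x, x ∈ C ↔ (RF cs info0 ∅ s x ∨ x ∈ M)) := by
  intro z
  induction z using Nat.strong_induction_on with
  | _ z IHz =>
    intro pos
    induction pos using Nat.strong_induction_on with
    | _ pos IHp =>
      intro q M h1 hstart hMlt hclosed hz hpos hMsound
      match q with
      | [] =>
        refine ⟨M, by rw [bfsLoop], fun x => ⟨Or.inr, ?_⟩⟩
        rintro (hx | hx)
        · refine RF_mem_of_closed cs info0 s M ?_ ?_ x hx
          · rcases hstart with h | h
            · exact h
            · simp at h
          · intro w hw v hv hvz hve
            rcases hclosed w hw v hv hvz hve with h | h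
            · exact h
            · simp at h
        · exact hx
      | node :: rest =>
        obtain ⟨m, rfl, hmn, hmRF⟩ := h1 _ List.mem_cons_self
        have hminfo : m < info0.length := by omega
        have hwz : (PySem.List.pyGetD (ovr nn info0 M) (m : Int) 1 == 0) =
            decide (m ∉ M ∧ info0.getD m 0 = 0) := by
          rw [ovr_get nn info0 M m hminfo]
          by_cases hd1 : m ∈ M
          · simp [hd1, hnn, Bool.beq_eq_decide_eq]
          · by_cases hd2 : info0.getD m 0 = 0 <;> simp [hd1, hd2, Bool.beq_eq_decide_eq]
        rw [bfsLoop.eq_def]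
        dsimp only
        simp only [hwz, ovr_set nn info0 M m hminfo,
          bfsScan_spec nn hnn cs info0 M m hminfo [], List.nil_append]
        set news := (PySem.List.pyRange 0 (cs.length : Int) 1).filter (fun next =>
          (PySem.List.pyGetD (ovr nn info0 (M ∪ {m})) next 1 == 0) &&
          !(PySem.List.pyGetD (PySem.List.pyGetD cs (m : Int) []) next 0 == 0)) with hnewsdef
        have hnews : ∀ x ∈ news, ∃ t : Nat, x = (t : Int) ∧ t < cs.length ∧
            (t ∉ M ∪ {m} ∧ info0.getD t 0 = 0) ∧ (cs.getD m []).getD t 0 ≠ 0 := by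
          intro x hx
          rw [hnewsdef, List.mem_filter] at hx
          obtain ⟨hxr, hxg⟩ := hx
          have hx' := (PySem.List.mem_pyRange_one).mp hxr
          refine ⟨x.toNat, by omega, by omega, ?_⟩
          rw [show x = ((x.toNat : Int)) by omega,
            guard_eq nn hnn cs info0 (M ∪ {m}) m x.toNat (by omega)] at hxg
          exact of_decide_eq_true hxg
        have hmemnews : ∀ t : Nat, t < cs.length → t ∉ M ∪ {m} → info0.getD t 0 = 0 →
            (cs.getD m []).getD t 0 ≠ 0 → (t : Int) ∈ news := by
          intro t ht htm htz hte
          rw [hnewsdef, List.mem_filter]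
          refine ⟨(PySem.List.mem_pyRange_one).mpr (by omega), ?_⟩
          rw [guard_eq nn hnn cs info0 (M ∪ {m}) m t (by omega)]
          exact decide_eq_true ⟨⟨htm, htz⟩, hte⟩
        -- shared invariants for the recursive call on q' = rest ++ news, M' = M ∪ {m}
        have hI1' : ∀ x ∈ rest ++ news, ∃ t : Nat, x = (t : Int) ∧ t < cs.length ∧
            RF cs info0 ∅ s t := by
          intro x hx
          rcases List.mem_append.mp hx with hx | hx
          · exact h1 x (List.mem_cons_of_mem _ hx)
          · obtain ⟨t, rfl, ht, ⟨_, htz⟩, hte⟩ := hnews x hx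
            exact ⟨t, rfl, ht, RF.step hmRF ht htz (Finset.notMem_empty t) hte⟩
        have hstart' : s ∈ M ∪ {m} ∨ (s : Int) ∈ rest ++ news := by
          rcases hstart with h | h
          · exact Or.inl (Finset.mem_union_left _ h)
          · rcases List.mem_cons.mp h with h | h
            · have : s = m := by exact_mod_cast h
              exact Or.inl (Finset.mem_union_right _ (by simp [this]))
            · exact Or.inr (List.mem_append_left _ h)
        have hMlt' : ∀ t ∈ M ∪ {m}, t < cs.length := by
          intro t ht
          rcases Finset.mem_union.mp ht with h | h
          · exact hMlt t h
          · rwa [Finset.mem_singleton.mp h]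
        have hclosed' : ∀ u ∈ M ∪ {m}, ∀ v, v < cs.length → info0.getD v 0 = 0 →
            (cs.getD u []).getD v 0 ≠ 0 → v ∈ M ∪ {m} ∨ (v : Int) ∈ rest ++ news := by
          intro u hu v hv hvz hve
          rcases Finset.mem_union.mp hu with hu' | hu'
          · rcases hclosed u hu' v hv hvz hve with h | h
            · exact Or.inl (Finset.mem_union_left _ h)
            · rcases List.mem_cons.mp h with h | h
              · have : v = m := by exact_mod_cast h
                exact Or.inl (Finset.mem_union_right _ (by simp [this]))
              · exact Or.inr (List.mem_append_left _ h)
          · have hum : u = m := Finset.mem_singleton.mp hu'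
            by_cases hvM : v ∈ M ∪ ({m} : Finset Nat)
            · exact Or.inl hvM
            · exact Or.inr (List.mem_append_right _ (hmemnews v hv hvM hvz (hum ▸ hve)))
        have hMsound' : ∀ x ∈ M ∪ {m}, RF cs info0 ∅ s x := by
          intro x hx
          rcases Finset.mem_union.mp hx with h | h
          · exact hMsound x h
          · rwa [Finset.mem_singleton.mp h]
        have hiffM' : ∀ (C : Finset Nat),
            (∀ x, x ∈ C ↔ (RF cs info0 ∅ s x ∨ x ∈ M ∪ {m})) →
            (∀ x, x ∈ C ↔ (RF cs info0 ∅ s x ∨ x ∈ M)) := by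
          intro C hC x
          rw [hC x]
          constructor
          · rintro (h | h)
            · exact Or.inl h
            · rcases Finset.mem_union.mp h with h | h
              · exact Or.inr h
              · exact Or.inl (Finset.mem_singleton.mp h ▸ hmRF)
          · rintro (h | h)
            · exact Or.inl h
            · exact Or.inr (Finset.mem_union_left _ h)
        by_cases hunm : m ∉ M ∧ info0.getD m 0 = 0
        · rw [if_pos (decide_eq_true hunm)]
          have hzer := zer_insert_of_unm info0 M m hminfo hunm.1 hunm.2
          match z, hz, hzer with
          | z' + 1, hz, hzer =>
            obtain ⟨C, heqC, hiff⟩ := IHz z' (Nat.lt_succ_self z') (rest ++ news).length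
              (rest ++ news) (M ∪ {m}) hI1' hstart' hMlt' hclosed' (by omega)
              (fun j hj _ => hj) hMsound'
            exact ⟨C, heqC, hiffM' C hiff⟩
        · rw [if_neg (by simpa using hunm)]
          have hzer := zer_insert_of_marked info0 M m (by tauto)
          have hpos0 : 0 < pos := by
            refine hpos 0 (by simp) ?_
            intro x hx
            simp only [List.take_succ_cons, List.take_zero, List.mem_singleton] at hx
            subst hx
            simpa using hunm
          match pos, hpos, hpos0 with
          | pos' + 1, hpos, hpos0 =>
            have hpos' : ∀ j, j < (rest ++ news).length → (∀ x ∈ (rest ++ news).take (j + 1),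
                ¬ (x.toNat ∉ M ∪ {m} ∧ info0.getD x.toNat 0 = 0)) → j < pos' := by
              intro j hj htake
              by_cases hjr : j + 1 ≤ rest.length
              · have htk : (rest ++ news).take (j + 1) = rest.take (j + 1) :=
                  List.take_append_of_le_length hjr
                have := hpos (j + 1) (by simp; omega) ?_
                · omega
                intro x hx
                rcases List.mem_cons.mp (by
                  simpa [List.take_succ_cons] using hx) with hx' | hx'
                · subst hx'
                  simpa using hunm
                · have hxM' := htake x (by rw [htk]; exact hx')
                  intro hc
                  apply hxM'
                  refine ⟨fun hmem => ?_, hc.2⟩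
                  rcases Finset.mem_union.mp hmem with h | h
                  · exact hc.1 h
                  · have : x.toNat = m := Finset.mem_singleton.mp h
                    exact hunm (this ▸ hc)
              · -- the head of news sits inside the taken prefix, contradiction
                exfalso
                have hlen2 : rest.length < j + 1 := by omega
                have hne : news ≠ [] := by
                  intro hnil
                  rw [List.length_append, hnil] at hj
                  simp at hj
                  omega
                match hx : news, hne with
                | e :: tl, _ =>
                  have hmem : e ∈ (rest ++ e :: tl).take (j + 1) := by
                    rw [List.take_append]
                    refine List.mem_append_right _ ?_
                    have : 0 < j + 1 - rest.length := by omega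
                    match h2 : j + 1 - rest.length, this with
                    | k + 1, _ => exact List.mem_cons_self
                  have he := htake e hmem
                  obtain ⟨t, rfl, ht, ⟨htM, htz⟩, _⟩ := hnews e List.mem_cons_self
                  exact he ⟨by simpa using htM, by simpa using htz⟩
            obtain ⟨C, heqC, hiff⟩ := IHp pos' (Nat.lt_succ_self pos')
              (rest ++ news) (M ∪ {m}) hI1' hstart' hMlt' hclosed' (by omega)
              hpos' hMsound'
            exact ⟨C, heqC, hiffM' C hiff⟩


theorem dfsFold_spec (nn : Int) (cs : List (List Int)) (info0 : List Int)
    (hnn : nn ≠ 0) (hlen : cs.length ≤ info0.length) (z : Nat) (u : Nat) (M₀ : Finset Nat)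
    (VIH : ∀ (v : Nat) (M : Finset Nat), v < cs.length → (∀ x ∈ M, x < cs.length) →
      zer info0 (M ∪ {v}) + 1 ≤ z →
      ∃ M', dfsVisit nn cs z (v : Int) (ovr nn info0 M) = ovr nn info0 M' ∧
        M ∪ {v} ⊆ M' ∧ (∀ x ∈ M', x < cs.length) ∧
        (∀ x ∈ M', x ∈ M ∨ RF cs info0 M v x) ∧
        (∀ w ∈ M', w ∉ M → ∀ t, t < cs.length → info0.getD t 0 = 0 →
          (cs.getD w []).getD t 0 ≠ 0 → t ∈ M')) :
    ∀ (l : List Int) (Mc : Finset Nat),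
      (∀ x ∈ l, ∃ m : Nat, x = (m : Int) ∧ m < cs.length) →
      (∀ x ∈ Mc, x < cs.length) → M₀ ⊆ Mc → u ∈ Mc →
      (∀ x ∈ Mc, x ∈ M₀ ∨ RF cs info0 M₀ u x) →
      zer info0 Mc ≤ z →
      ∃ M', dfsFold nn cs z (u : Int) l (ovr nn info0 Mc) = ovr nn info0 M' ∧
        Mc ⊆ M' ∧ (∀ x ∈ M', x < cs.length) ∧
        (∀ x ∈ M', x ∈ M₀ ∨ RF cs info0 M₀ u x) ∧
        (∀ w ∈ M', w ∉ Mc → ∀ t, t < cs.length → info0.getD t 0 = 0 →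
          (cs.getD w []).getD t 0 ≠ 0 → t ∈ M') ∧
        (∀ m : Nat, m < cs.length → (m : Int) ∈ l → info0.getD m 0 = 0 →
          (cs.getD u []).getD m 0 ≠ 0 → m ∈ M') := by
  intro l
  induction l with
  | nil =>
    intro Mc _ hMc hM0 hu hsound hz
    refine ⟨Mc, by rw [dfsFold], Finset.Subset.refl _, hMc, hsound, ?_, ?_⟩
    · intro w hw hw2; exact absurd hw hw2
    · intro m _ hm; simp at hm
  | cons a l ih =>
    intro Mc hl hMc hM0 hu hsound hz
    obtain ⟨m, rfl, hmn⟩ := hl a List.mem_cons_self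
    have hminfo : m < info0.length := by omega
    rw [dfsFold, guard_eq nn hnn cs info0 Mc u m hminfo]
    by_cases hg : (m ∉ Mc ∧ info0.getD m 0 = 0) ∧ (cs.getD u []).getD m 0 ≠ 0
    · rw [if_pos (by simpa using hg)]
      obtain ⟨⟨hmnot, hmz⟩, hedge⟩ := hg
      have hzer := zer_insert_of_unm info0 Mc m hminfo hmnot hmz
      obtain ⟨M₁, heq1, hsub1, hlt1, hsound1, hclosed1⟩ :=
        VIH m Mc hmn hMc (by omega)
      have hMcM₁ : Mc ⊆ M₁ := fun x hx => hsub1 (Finset.mem_union_left _ hx)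
      have hRFm : RF cs info0 M₀ u m :=
        RF.step RF.base hmn hmz (fun hx => hmnot (hM0 hx)) hedge
      rw [heq1]
      obtain ⟨M', heq, hsub, hlt, hsound', hclosed, hproc⟩ := ih M₁
        (fun x hx => hl x (List.mem_cons_of_mem _ hx)) hlt1
        (fun x hx => hMcM₁ (hM0 hx))
        (hMcM₁ hu)
        (fun x hx => by
          rcases hsound1 x hx with hx' | hx'
          · exact hsound x hx'
          · exact Or.inr (RF_mono_trans cs info0 M₀ Mc u m x hM0 hRFm hx'))
        (le_trans (zer_anti info0 Mc M₁ hMcM₁) hz)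
      refine ⟨M', heq, fun x hx => hsub (hMcM₁ hx), hlt, hsound', ?_, ?_⟩
      · intro w hw hwMc t ht htz hte
        by_cases hwM₁ : w ∈ M₁
        · exact hsub (hclosed1 w hwM₁ hwMc t ht htz hte)
        · exact hclosed w hw hwM₁ t ht htz hte
      · intro m' hm' hmem hmz' hedge'
        rcases List.mem_cons.mp hmem with hma | hml
        · have : m' = m := by exact_mod_cast hma
          subst this
          exact hsub (hsub1 (Finset.mem_union_right _ (Finset.mem_singleton_self m')))
        · exact hproc m' hm' hml hmz' hedge'
    · rw [if_neg (by simpa using hg)]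
      obtain ⟨M', heq, hsub, hlt, hsound', hclosed, hproc⟩ := ih Mc
        (fun x hx => hl x (List.mem_cons_of_mem _ hx)) hMc hM0 hu hsound hz
      refine ⟨M', heq, hsub, hlt, hsound', hclosed, ?_⟩
      intro m' hm' hmem hmz' hedge'
      rcases List.mem_cons.mp hmem with hma | hml
      · have : m' = m := by exact_mod_cast hma
        subst this
        have : m' ∈ Mc := by
          by_contra hnot
          exact hg ⟨⟨hnot, hmz'⟩, hedge'⟩
        exact hsub this
      · exact hproc m' hm' hml hmz' hedge'


theorem dfsVisit_spec (nn : Int) (cs : List (List Int)) (info0 : List Int)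
    (hnn : nn ≠ 0) (hlen : cs.length ≤ info0.length) :
    ∀ (z : Nat) (v : Nat) (M : Finset Nat), v < cs.length → (∀ x ∈ M, x < cs.length) →
      zer info0 (M ∪ {v}) + 1 ≤ z →
      ∃ M', dfsVisit nn cs z (v : Int) (ovr nn info0 M) = ovr nn info0 M' ∧
        M ∪ {v} ⊆ M' ∧ (∀ x ∈ M', x < cs.length) ∧
        (∀ x ∈ M', x ∈ M ∨ RF cs info0 M v x) ∧
        (∀ w ∈ M', w ∉ M → ∀ t, t < cs.length → info0.getD t 0 = 0 →
          (cs.getD w []).getD t 0 ≠ 0 → t ∈ M') := by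
  intro z
  induction z using Nat.strong_induction_on with
  | _ z IH =>
    match z with
    | 0 =>
      intro v M hv hM hz
      omega
    | z' + 1 =>
      intro v M hv hM hz
      have hv' : v < info0.length := by omega
      rw [dfsVisit, ovr_set nn info0 M v hv']
      obtain ⟨M', heq, hsubMc, hlt, hsound, hclosed, hproc⟩ :=
        dfsFold_spec nn cs info0 hnn hlen z' v M
          (fun v' M' hv'2 hM'2 hz'2 => IH z' (Nat.lt_succ_self z') v' M' hv'2 hM'2 hz'2)
          (PySem.List.pyRange 0 (cs.length : Int) 1) (M ∪ {v})
          (fun x hx => by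
            have hx' := (PySem.List.mem_pyRange_one).mp hx
            exact ⟨x.toNat, by omega, by omega⟩)
          (fun x hx => by
            rcases Finset.mem_union.mp hx with h | h
            · exact hM x h
            · rwa [Finset.mem_singleton.mp h])
          (fun x hx => Finset.mem_union_left _ hx)
          (Finset.mem_union_right _ (Finset.mem_singleton_self v))
          (fun x hx => by
            rcases Finset.mem_union.mp hx with h | h
            · exact Or.inl h
            · exact Or.inr (Finset.mem_singleton.mp h ▸ RF.base))
          (by omega)
      refine ⟨M', heq, hsubMc, hlt, hsound, ?_⟩
      intro w hw hwM t ht htz hte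
      by_cases hwMc : w ∈ M ∪ {v}
      · have hwv : w = v := by
          rcases Finset.mem_union.mp hwMc with h | h
          · exact absurd h hwM
          · exact Finset.mem_singleton.mp h
        subst hwv
        exact hproc t ht (by rw [PySem.List.mem_pyRange_one]; omega) htz hte
      · exact hclosed w hw hwMc t ht htz hte



-- B's dfs loop leaves the state alone when the guard rejects every remaining index.
theorem dfsFold_id (nn : Int) (cs : List (List Int)) (z : Nat) (node : Int) :
    ∀ (l : List Int) (c : List Int),
      (∀ x ∈ l, ((PySem.List.pyGetD c x 1 == 0) &&
        !(PySem.List.pyGetD (PySem.List.pyGetD cs node []) x 0 == 0)) = false) →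
      dfsFold nn cs z node l c = c := by
  intro l
  induction l with
  | nil => intro c _; rw [dfsFold]
  | cons a l ih =>
    intro c h
    rw [dfsFold, h a List.mem_cons_self]
    simp only [Bool.false_eq_true, if_false]
    exact ih c (fun x hx => h x (List.mem_cons_of_mem _ hx))

-- A's inner scan leaves the state alone when the guard rejects every remaining index.
theorem scanFold_id (nn node : Int) (cs : List (List Int)) :
    ∀ (l : List Int) (c acc : List Int),
      (∀ x ∈ l, ((PySem.List.pyGetD c x 1 == 0) &&
        !(PySem.List.pyGetD (PySem.List.pyGetD cs node []) x 0 == 0)) = false) →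
      l.foldl (fun st next =>
        if PySem.List.pyGetD st.1 next 1 == 0 &&
           !(PySem.List.pyGetD (PySem.List.pyGetD cs node []) next 0 == 0)
        then (PySem.List.pySetD st.1 node nn, st.2 ++ [next]) else st) (c, acc) = (c, acc) := by
  intro l
  induction l with
  | nil => intro c acc _; rfl
  | cons a l ih =>
    intro c acc h
    rw [List.foldl_cons]
    have := h a List.mem_cons_self
    simp only [this, Bool.false_eq_true, if_false]
    exact ih c acc (fun x hx => h x (List.mem_cons_of_mem _ hx))

theorem dfsVisit_succ (nn : Int) (cs : List (List Int)) (z : Nat) (node : Int)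
    (info : List Int) :
    dfsVisit nn cs (z + 1) node info = dfsFold nn cs z node
      (PySem.List.pyRange 0 (cs.length : Int) 1) (PySem.List.pySetD info node nn) := by
  rw [dfsVisit]

-- the one-pop run of A's loop when the scan enqueues nothing
theorem bfsLoop_single (nn : Int) (cs : List (List Int)) (z pos : Nat) (node : Int)
    (info c : List Int)
    (hscan : bfsScan nn node cs (PySem.List.pySetD info node nn, []) = (c, [])) :
    bfsLoop nn cs (z + 1) (pos + 1) [node] info = c := by
  rw [bfsLoop.eq_def]
  dsimp only
  rw [hscan]
  by_cases hb : (PySem.List.pyGetD info node 1 == 0) = true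
  · rw [if_pos hb]
    show bfsLoop nn cs z 0 [] c = c
    rw [bfsLoop]
  · rw [if_neg hb]
    show bfsLoop nn cs (z + 1) pos [] c = c
    rw [bfsLoop]

-- ===== VERDICT (by name: the statement is the Claim_ definition above) =====
theorem bfs_spec : Claim_equal_bfs := by
  intro i network_number computers network_info _ hpre
  unfold Spec_bfs
  rcases hpre with ⟨hle, hinr, hS⟩ | ⟨hi0, hilt, hlen, _hsq, hnn⟩
  · -- single-visit branch: both programs just label the start node and stop
    have hgf : ∀ x ∈ PySem.List.pyRange 0 (computers.length : Int) 1,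
        ((PySem.List.pyGetD (PySem.List.pySetD network_info i network_number) x 1 == 0) &&
         !(PySem.List.pyGetD (PySem.List.pyGetD computers i []) x 0 == 0)) = false := by
      intro x hx
      have hx' := (PySem.List.mem_pyRange_one).mp hx
      have hxt : x = (x.toNat : Int) := by omega
      have ht : x.toNat < computers.length := by omega
      have hlen1 : (PySem.List.pySetD network_info i network_number).length =
          network_info.length := PySem.List.length_pySetD _ _ _
      have htlt : x.toNat < (PySem.List.pySetD network_info i network_number).length := by
        omega
      by_cases hz0 : (PySem.List.pySetD network_info i network_number).getD x.toNat 0 = 0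
      · obtain ⟨-, hrow⟩ := hS x.toNat ht hz0
        have h2 : PySem.List.pyGetD (PySem.List.pyGetD computers i []) x 0 = 0 := by
          show (PySem.List.pyGet? (PySem.List.pyGetD computers i []) x).getD 0 = 0
          rw [hxt, hrow]
          rfl
        simp [h2]
      · have h1 : PySem.List.pyGetD (PySem.List.pySetD network_info i network_number) x 1 =
            (PySem.List.pySetD network_info i network_number).getD x.toNat 0 := by
          show (PySem.List.pyGet? (PySem.List.pySetD network_info i network_number) x).getD 1 = _
          rw [hxt, PySem.List.pyGet?_natCast, List.getElem?_eq_getElem htlt]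
          simp only [List.getD_eq_getElem?_getD]
          rw [Int.toNat_natCast, List.getElem?_eq_getElem htlt]
          rfl
        have hz0' : ¬ (PySem.List.pySetD network_info i network_number)[x.toNat]?.getD 0 = 0 := by
          simpa [List.getD_eq_getElem?_getD] using hz0
        simp [h1, hz0']
    have hscan : bfsScan network_number i computers
        (PySem.List.pySetD network_info i network_number, []) =
        (PySem.List.pySetD network_info i network_number, []) := by
      unfold bfsScan
      exact scanFold_id network_number i computers _ _ [] hgf
    unfold bfs bfs_alt
    rw [bfsLoop_single network_number computers network_info.length 0 i network_info _ hscan,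
      dfsVisit_succ,
      dfsFold_id network_number computers network_info.length i _ _ hgf]
  · have hslt : i.toNat < computers.length := by omega
    have his : i = (i.toNat : Int) := by omega
    unfold bfs bfs_alt
    obtain ⟨C, heqA, hiffA⟩ := bfsLoop_spec network_number computers network_info hnn hlen i.toNat
      (network_info.length + 1) 1 [(i.toNat : Int)] ∅
      (fun x hx => by
        rw [List.mem_singleton] at hx
        exact ⟨i.toNat, hx, hslt, RF.base⟩)
      (Or.inr (by rw [List.mem_singleton]))
      (fun m hm => absurd hm (Finset.notMem_empty m))
      (fun u hu => absurd hu (Finset.notMem_empty u))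
      (by have := zer_le network_info (∅ : Finset Nat); omega)
      (fun j hj _ => by simpa using hj)
      (fun x hx => absurd hx (Finset.notMem_empty x))
    obtain ⟨M', heqB, hsubB, _, hsoundB, hclosedB⟩ := dfsVisit_spec network_number computers
      network_info hnn hlen (network_info.length + 1) i.toNat ∅ hslt
      (fun x hx => absurd hx (Finset.notMem_empty x))
      (by have := zer_le network_info ((∅ : Finset Nat) ∪ {i.toNat}); omega)
    have hsM' : i.toNat ∈ M' := hsubB (Finset.mem_union_right _ (Finset.mem_singleton_self _))
    have hCM : C = M' := by
      ext x
      rw [hiffA x]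
      constructor
      · rintro (h | h)
        · exact RF_mem_of_closed computers network_info i.toNat M' hsM'
            (fun w hw v hv hvz hve => hclosedB w hw (Finset.notMem_empty w) v hv hvz hve) x h
        · exact absurd h (Finset.notMem_empty x)
      · intro h
        rcases hsoundB x h with h' | h'
        · exact absurd h' (Finset.notMem_empty x)
        · exact Or.inl h'
    rw [ovr_empty] at heqA heqB
    rw [his, heqA, heqB, hCM]
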